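-- pv_equiv track=rewrite | github.com/needlesndpins/Algorithm_Runtime_Experiments | code/bad_sorts.py | find_min_and_max_index
-- ===== SOURCE A (Python) =====
-- def find_min_and_max_index(L,j,k):
--     min_ind = j
--     max_ind = j
--
--     for i in range(j + 1, k):
--         if L[i] < L[min_ind]:
--             min_ind = i
--
--         elif L[max_ind] < L[i]:
--             max_ind = i
--
--     return (min_ind,max_ind)
-- ===== SOURCE B (Python) =====
-- def find_min_and_max_index(L, j, k):
--     if k <= j + 1:
--         return (j, j)
--     r = range(j, k)
--     return (min(r, key=L.__getitem__), max(r, key=L.__getitem__))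
-- ===== Notes on version B (the rewrite author's own statement) =====
-- stated objective: simpler
-- what changed: Replaces the single fused loop carrying two indices (with the elif coupling) by an empty-subrange guard plus two independent library scans: min and max over range(j,k) keyed by L.__getitem__, each returning the first extremal index.
import Mathlib
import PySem

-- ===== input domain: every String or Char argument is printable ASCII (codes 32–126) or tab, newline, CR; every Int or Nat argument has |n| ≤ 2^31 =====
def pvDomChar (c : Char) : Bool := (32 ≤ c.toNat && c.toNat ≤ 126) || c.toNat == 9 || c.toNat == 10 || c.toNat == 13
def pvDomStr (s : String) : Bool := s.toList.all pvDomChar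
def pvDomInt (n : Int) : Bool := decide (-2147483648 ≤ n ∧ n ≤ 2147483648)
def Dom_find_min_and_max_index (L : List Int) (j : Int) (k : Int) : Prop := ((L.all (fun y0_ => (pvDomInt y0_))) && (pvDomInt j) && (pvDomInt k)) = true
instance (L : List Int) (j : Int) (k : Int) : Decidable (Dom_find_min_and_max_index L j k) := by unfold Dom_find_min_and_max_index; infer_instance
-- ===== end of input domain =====

-- B replaces A's fused two-index loop by a guard plus two independent first-extremal scans (simpler decomposition, same cost).

-- ===== PORT A =====
-- L[i] is pyGetD with default 0: Pre_ guarantees every visited index is in range (Python wraps negatives; so does pyGetD).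
def find_min_and_max_index (L : List Int) (j : Int) (k : Int) : Int × Int :=
  (PySem.List.pyRange (j + 1) k 1).foldl
    (fun p i =>
      if PySem.List.pyGetD L i 0 < PySem.List.pyGetD L p.1 0 then (i, p.2)
      else if PySem.List.pyGetD L p.2 0 < PySem.List.pyGetD L i 0 then (p.1, i)
      else p)
    (j, j)

-- ===== PORT B =====
def find_min_and_max_index_alt (L : List Int) (j : Int) (k : Int) : Int × Int :=
  if k ≤ j + 1 then (j, j)
  else
    ((PySem.List.min? (PySem.List.pyRange j k 1) (fun i => PySem.List.pyGetD L i 0)).getD j,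
     (PySem.List.max? (PySem.List.pyRange j k 1) (fun i => PySem.List.pyGetD L i 0)).getD j)

-- ===== PRECONDITION & SPEC =====
-- Pre_ excludes exactly the inputs where Python A raises IndexError: a non-trivial subrange
-- whose index set [j, k-1] leaves the valid Python index range [-len(L), len(L)-1].
def Pre_find_min_and_max_index (L : List Int) (j : Int) (k : Int) : Prop :=
  k ≤ j + 1 ∨ (-(L.length : Int) ≤ j ∧ k ≤ (L.length : Int))
instance (L : List Int) (j : Int) (k : Int) : Decidable (Pre_find_min_and_max_index L j k) := by
  unfold Pre_find_min_and_max_index; infer_instance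

def pvWitness_find_min_and_max_index : List Int × Int × Int := ([3, 1, 2], 0, 3)

def Spec_find_min_and_max_index (L : List Int) (j : Int) (k : Int) (out : Int × Int) : Prop :=
  out = find_min_and_max_index_alt L j k
instance (L : List Int) (j : Int) (k : Int) (out : Int × Int) : Decidable (Spec_find_min_and_max_index L j k out) := by
  unfold Spec_find_min_and_max_index; infer_instance

-- ===== CLAIM (what is proved, stated in full; the proofs are below) =====
def Claim_equal_find_min_and_max_index : Prop := ∀ (L : List Int) (j : Int) (k : Int), Dom_find_min_and_max_index L j k → Pre_find_min_and_max_index L j k → Spec_find_min_and_max_index L j k (find_min_and_max_index L j k)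

-- ===== LEMMAS AND PROOFS =====

-- min(m :: l) with a key is the plain running-first-min fold started at m.
theorem min?_cons_foldl (g : Int → Int) (l : List Int) (m : Int) :
    PySem.List.min? (m :: l) g = some (l.foldl (fun m x => if g x < g m then x else m) m) := by
  induction l generalizing m with
  | nil => rfl
  | cons a t ih =>
    have h : PySem.List.min? (m :: a :: t) g = PySem.List.min? ((if g a < g m then a else m) :: t) g := by
      by_cases hc : g a < g m <;> simp [PySem.List.min?, List.foldl, hc]
    rw [h, ih]
    by_cases hc : g a < g m <;> simp [List.foldl, hc]

theorem max?_cons_foldl (g : Int → Int) (l : List Int) (m : Int) :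
    PySem.List.max? (m :: l) g = some (l.foldl (fun m x => if g m < g x then x else m) m) := by
  induction l generalizing m with
  | nil => rfl
  | cons a t ih =>
    have h : PySem.List.max? (m :: a :: t) g = PySem.List.max? ((if g m < g a then a else m) :: t) g := by
      by_cases hc : g m < g a <;> simp [PySem.List.max?, List.foldl, hc]
    rw [h, ih]
    by_cases hc : g m < g a <;> simp [List.foldl, hc]

-- The fused loop splits into the two independent scans, under the invariant g mn ≤ g mx.
theorem fused_eq_two_scans (g : Int → Int) (l : List Int) (mn mx : Int) (h : g mn ≤ g mx) :
    l.foldl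
      (fun p i =>
        if g i < g p.1 then (i, p.2)
        else if g p.2 < g i then (p.1, i)
        else p)
      (mn, mx)
    = (l.foldl (fun m i => if g i < g m then i else m) mn,
       l.foldl (fun m i => if g m < g i then i else m) mx) := by
  induction l generalizing mn mx with
  | nil => rfl
  | cons a t ih =>
    simp only [List.foldl]
    by_cases h1 : g a < g mn
    · have h2 : ¬ g mn < g a := by omega
      have h3 : ¬ g mx < g a := by omega
      simp only [if_pos h1, if_neg h3]
      exact ih a mx (by omega)
    · by_cases h2 : g mx < g a
      · simp only [if_neg h1, if_pos h2]
        exact ih mn a (by omega)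
      · simp only [if_neg h1, if_neg h2]
        exact ih mn mx h

-- ===== VERDICT (by name: the statement is the Claim_ definition above) =====
theorem find_min_and_max_index_spec : Claim_equal_find_min_and_max_index := by
  intro L j k _ _
  unfold Spec_find_min_and_max_index find_min_and_max_index find_min_and_max_index_alt
  by_cases hk : k ≤ j + 1
  · rw [if_pos hk, PySem.List.pyRange_one_eq_nil (by omega)]
    rfl
  · rw [if_neg hk, PySem.List.pyRange_one_cons (show j < k by omega),
       min?_cons_foldl, max?_cons_foldl]
    exact fused_eq_two_scans (fun i => PySem.List.pyGetD L i 0) _ j j le_rfl
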